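-- pv_equiv track=rewrite | github.com/veera-damisetti/DSA | Algorithms/Bit_Manipulation/Check_whether_K-th_bit_is_set_or_not.py | checkKthBit
-- ===== SOURCE A (Python) =====
-- def checkKthBit(n,k):
--     position=0
--     for i in range(32):
--
--         if position==k:
--             mask=1<<i
--             if mask & n >0:
--                 return True
--         position+=1
--     return False
-- ===== SOURCE B (Python) =====
-- def checkKthBit(n, k):
--     return 0 <= k < 32 and (n >> k) & 1 == 1
-- ===== Notes on version B (the rewrite author's own statement) =====
-- stated objective: simpler
-- what changed: Replaces the 32-iteration position-scanning loop with a single closed-form bit test (n >> k) & 1 guarded by 0 <= k < 32.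
import Mathlib
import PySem

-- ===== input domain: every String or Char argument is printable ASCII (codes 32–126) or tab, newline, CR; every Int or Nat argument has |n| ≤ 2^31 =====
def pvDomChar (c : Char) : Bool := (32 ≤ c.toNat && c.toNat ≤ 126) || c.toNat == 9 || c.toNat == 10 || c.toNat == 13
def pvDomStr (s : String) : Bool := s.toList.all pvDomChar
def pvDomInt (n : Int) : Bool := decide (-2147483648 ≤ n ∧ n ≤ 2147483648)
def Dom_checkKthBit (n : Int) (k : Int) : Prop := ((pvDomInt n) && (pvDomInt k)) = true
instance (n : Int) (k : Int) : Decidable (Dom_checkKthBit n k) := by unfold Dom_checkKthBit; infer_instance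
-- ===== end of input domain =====

-- B replaces A's 32-iteration position-scanning loop with a single guarded bit test; objective: simpler.

-- ===== PORT A =====
-- the 'for i in range(32)' loop with early return; i is the range counter, position mirrors Python's counter
def checkKthBitLoop (n k : Int) (i : Nat) (position : Int) : Bool :=
  if i < 32 then
    if position = k then
      if 0 < PySem.Int.band ((1 : Int) <<< i) n then true
      else checkKthBitLoop n k (i + 1) (position + 1)
    else checkKthBitLoop n k (i + 1) (position + 1)
  else false
termination_by 32 - i

def checkKthBit (n : Int) (k : Int) : Bool := checkKthBitLoop n k 0 0

-- ===== PORT B =====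
-- Source B: return 0 <= k < 32 and (n >> k) & 1 == 1
def checkKthBit_alt (n : Int) (k : Int) : Bool :=
  decide (0 ≤ k) && decide (k < 32) && (PySem.Int.band (n >>> k.toNat) 1 == 1)

-- ===== PRECONDITION & SPEC =====
def Spec_checkKthBit (n : Int) (k : Int) (out : Bool) : Prop := out = checkKthBit_alt n k
instance (n : Int) (k : Int) (out : Bool) : Decidable (Spec_checkKthBit n k out) := by unfold Spec_checkKthBit; infer_instance

-- ===== CLAIM (what is proved, stated in full; the proofs are below) =====
def Claim_equal_checkKthBit : Prop := ∀ (n : Int) (k : Int), Dom_checkKthBit n k → Spec_checkKthBit n k (checkKthBit n k)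

-- ===== LEMMAS AND PROOFS =====

lemma one_shiftLeft_eq (i : Nat) : (1 : Int) <<< i = ((2 ^ i : Nat) : Int) := by
  simp [Int.shiftLeft_eq]

lemma band_pow_ofNat (m i : Nat) :
    PySem.Int.band ((1 : Int) <<< i) (Int.ofNat m) = ((2 ^ i * (m.testBit i).toNat : Nat) : Int) := by
  rw [one_shiftLeft_eq]
  have h : (Int.ofNat m) = ((m : Nat) : Int) := rfl
  rw [h, PySem.Int.band_natCast, Nat.two_pow_and]

lemma band_pow_negSucc (m i : Nat) :
    PySem.Int.band ((1 : Int) <<< i) (Int.negSucc m) = ((2 ^ i - 2 ^ i * (m.testBit i).toNat : Nat) : Int) := by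
  rw [one_shiftLeft_eq]
  unfold PySem.Int.band
  rw [if_pos (Int.natCast_nonneg _), if_neg (by rw [Int.negSucc_eq]; omega)]
  have h2 : ((2 ^ i : Nat) : Int).toNat = 2 ^ i := Int.toNat_natCast _
  have h3 : (-(Int.negSucc m) - 1).toNat = m := by rw [Int.negSucc_eq]; omega
  rw [h2, h3, Nat.two_pow_and]

lemma mod_ofNat_two (q : Nat) : PySem.Int.mod (Int.ofNat q) 2 = (q : Int) % 2 := by
  simp [PySem.Int.mod, Int.fmod_eq_emod]

lemma mod_negSucc_two (q : Nat) : PySem.Int.mod (Int.negSucc q) 2 = 1 - ((q : Int)) % 2 := by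
  simp [PySem.Int.mod, Int.negSucc_eq, Int.fmod_eq_emod]
  omega

lemma testBit_eq_mod (m i : Nat) : m.testBit i = ((m >>> i) % 2 == 1) := by
  simp [Nat.testBit]

-- A's test 'mask & n > 0' at bit i agrees with B's test '(n >> i) & 1 == 1'
lemma band_pow_pos_iff (i : Nat) (n : Int) :
    (0 < PySem.Int.band ((1 : Int) <<< i) n) ↔ (PySem.Int.band (n >>> i) 1 = 1) := by
  rw [PySem.Int.band_one]
  have hp : 0 < 2 ^ i := Nat.two_pow_pos i
  cases n with
  | ofNat m =>
    rw [band_pow_ofNat, show (Int.ofNat m) >>> i = Int.ofNat (m >>> i) from rfl, mod_ofNat_two]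
    have ht := testBit_eq_mod m i
    cases hbit : m.testBit i <;> rw [hbit] at ht <;> simp at ht <;>
      simp only [Bool.toNat_false, Bool.toNat_true, Nat.mul_zero, Nat.mul_one] <;> omega
  | negSucc m =>
    rw [band_pow_negSucc, show (Int.negSucc m) >>> i = Int.negSucc (m >>> i) from rfl, mod_negSucc_two]
    have ht := testBit_eq_mod m i
    cases hbit : m.testBit i <;> rw [hbit] at ht <;> simp at ht <;>
      simp only [Bool.toNat_false, Bool.toNat_true, Nat.mul_zero, Nat.mul_one,
        Nat.sub_zero, Nat.sub_self] <;> omega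

lemma loopA_eq (n k : Int) (j : Nat) : ∀ i : Nat, 32 - i = j →
    checkKthBitLoop n k i (i : Int) =
      ((decide ((i : Int) ≤ k) && decide (k < 32)) && (PySem.Int.band (n >>> k.toNat) 1 == 1)) := by
  induction j with
  | zero =>
    intro i hi
    have h32 : ¬ i < 32 := by omega
    unfold checkKthBitLoop
    rw [if_neg h32]
    have : ¬ ((i : Int) ≤ k ∧ k < 32) := by omega
    by_cases h1 : (i : Int) ≤ k <;> by_cases h2 : k < 32 <;> simp [h1, h2] at this ⊢
  | succ j ih =>
    intro i hi
    have hlt : i < 32 := by omega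
    have hcast : (i : Int) + 1 = ((i + 1 : Nat) : Int) := by push_cast; ring
    unfold checkKthBitLoop
    rw [if_pos hlt]
    by_cases hk : (i : Int) = k
    · rw [if_pos hk]
      have hkn : k.toNat = i := by omega
      by_cases hbit : 0 < PySem.Int.band ((1 : Int) <<< i) n
      · rw [if_pos hbit]
        have hb := (band_pow_pos_iff i n).mp hbit
        have hk32 : k < 32 := by omega
        simp [hb, ← hk, hlt]
      · rw [if_neg hbit]
        rw [hcast, ih (i + 1) (by omega)]
        have hb : PySem.Int.band (n >>> i) 1 ≠ 1 := fun h => hbit ((band_pow_pos_iff i n).mpr h)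
        simp [← hk, hb]
        try omega
    · rw [if_neg hk]
      rw [hcast, ih (i + 1) (by omega)]
      have h2 : ((i : Int) + 1 ≤ k) ↔ ((i : Int) ≤ k) := by omega
      push_cast
      simp [h2]

-- ===== VERDICT (by name: the statement is the Claim_ definition above) =====
theorem checkKthBit_spec : Claim_equal_checkKthBit := by
  intro n k _
  unfold Spec_checkKthBit checkKthBit checkKthBit_alt
  have h := loopA_eq n k 32 0 rfl
  simpa using h
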